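-- pv_equiv track=rewrite | github.com/syeoeonn/TRiAs | src/trias/summary/motif_summary.py | format_multi_motif_range
-- ===== SOURCE A (Python) =====
-- from typing import List, Tuple, Dict, Optional
--
-- def format_min_max_range(values_list):
--     if not values_list:
--         return "."
--     if len(values_list) == 1:
--         return str(values_list[0])
--     mn, mx = min(values_list), max(values_list)
--     return str(mn) if mn == mx else f"{mn}-{mx}"
--
-- def format_multi_motif_range(values: List[int], motif_count: int) -> str:
--     if not values:
--         return "."
--     if motif_count == 1:
--         return format_min_max_range(values)
--     parts = []
--     for i in range(motif_count):
--         sub = [values[j] for j in range(i, len(values), motif_count)]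
--         parts.append(format_min_max_range(sub))
--     return "_".join(parts)
-- ===== SOURCE B (Python) =====
-- def format_multi_motif_range(values, motif_count):
--     if not values:
--         return "."
--     if motif_count <= 0:
--         return ""
--     accs = [None] * motif_count
--     for j, v in enumerate(values):
--         k = j % motif_count
--         a = accs[k]
--         accs[k] = (v, v) if a is None else (min(a[0], v), max(a[1], v))
--     parts = []
--     for a in accs:
--         if a is None:
--             parts.append(".")
--         elif a[0] == a[1]:
--             parts.append(str(a[0]))
--         else:
--             parts.append(f"{a[0]}-{a[1]}")
--     return "_".join(parts)
-- ===== Notes on version B (the rewrite author's own statement) =====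
-- stated objective: alternative
-- what changed: Replaces the per-motif strided index scans (one sublist built and min/max'd per offset) by a single pass over values that updates a per-position (min,max) accumulator at index j % motif_count, then formats the accumulators.
import Mathlib
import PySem

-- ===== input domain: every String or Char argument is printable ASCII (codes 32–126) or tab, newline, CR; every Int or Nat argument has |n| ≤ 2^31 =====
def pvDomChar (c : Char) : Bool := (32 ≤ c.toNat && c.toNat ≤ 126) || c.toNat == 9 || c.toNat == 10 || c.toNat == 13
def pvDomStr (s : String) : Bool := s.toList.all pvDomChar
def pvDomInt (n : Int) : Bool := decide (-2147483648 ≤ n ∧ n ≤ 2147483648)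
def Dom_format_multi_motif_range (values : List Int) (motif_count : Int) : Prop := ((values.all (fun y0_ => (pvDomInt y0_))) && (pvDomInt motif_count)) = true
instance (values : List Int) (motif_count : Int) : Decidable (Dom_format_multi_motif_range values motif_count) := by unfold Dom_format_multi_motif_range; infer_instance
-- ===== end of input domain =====

-- B replaces A's per-motif strided index scans by a single pass with per-position (min,max) accumulators; alternative decomposition, same cost.

-- ===== PORT A =====
-- helper format_min_max_range of A
def pvFmmr (vs : List Int) : String :=
  if vs = [] then "."
  else if vs.length = 1 then PySem.Int.toStr (PySem.List.pyGetD vs 0 0)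
  else
    let mn := (PySem.List.min? vs (fun y => y)).getD 0
    let mx := (PySem.List.max? vs (fun y => y)).getD 0
    if mn = mx then PySem.Int.toStr mn
    else PySem.Str.join "" [PySem.Int.toStr mn, "-", PySem.Int.toStr mx]

def format_multi_motif_range (values : List Int) (motif_count : Int) : String :=
  if values = [] then "."
  else if motif_count = 1 then pvFmmr values
  else
    PySem.Str.join "_" ((PySem.List.pyRange 0 motif_count 1).map (fun i =>
      pvFmmr ((PySem.List.pyRange i (values.length : Int) motif_count).map
        (fun j => PySem.List.pyGetD values j 0))))

-- ===== PORT B =====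
-- the accumulator update `(v, v) if a is None else (min(a[0], v), max(a[1], v))` of Source B
def pvUpd (a : Option (Int × Int)) (v : Int) : Option (Int × Int) :=
  match a with
  | none => some (v, v)
  | some p => some (min p.1 v, max p.2 v)

-- the loop body of Source B: accs[k] = pvUpd(accs[k], v) at k = j % motif_count
def pvStepB (mc : Int) (accs : List (Option (Int × Int))) (jv : Int × Int) : List (Option (Int × Int)) :=
  PySem.List.pySetD accs (PySem.Int.mod jv.1 mc)
    (pvUpd (PySem.List.pyGetD accs (PySem.Int.mod jv.1 mc) none) jv.2)

-- formatting of one accumulator ('.' / str(mn) / f"{mn}-{mx}")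
def pvFmtAcc (a : Option (Int × Int)) : String :=
  match a with
  | none => "."
  | some p =>
    if p.1 = p.2 then PySem.Int.toStr p.1
    else PySem.Str.join "" [PySem.Int.toStr p.1, "-", PySem.Int.toStr p.2]

def format_multi_motif_range_alt (values : List Int) (motif_count : Int) : String :=
  if values = [] then "."
  else if motif_count ≤ 0 then ""
  else
    PySem.Str.join "_" (((PySem.List.enumerate values 0).foldl (pvStepB motif_count)
      (List.replicate motif_count.toNat none)).map pvFmtAcc)

-- ===== PRECONDITION & SPEC =====
def Spec_format_multi_motif_range (values : List Int) (motif_count : Int) (out : String) : Prop := out = format_multi_motif_range_alt values motif_count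
instance (values : List Int) (motif_count : Int) (out : String) : Decidable (Spec_format_multi_motif_range values motif_count out) := by unfold Spec_format_multi_motif_range; infer_instance

-- ===== CLAIM (what is proved, stated in full; the proofs are below) =====
def Claim_equal_format_multi_motif_range : Prop := ∀ (values : List Int) (motif_count : Int), Dom_format_multi_motif_range values motif_count → Spec_format_multi_motif_range values motif_count (format_multi_motif_range values motif_count)

-- ===== LEMMAS AND PROOFS =====

-- elements of vs at offsets s, s+n, s+2n, …
def pvEvery (vs : List Int) (s n : Nat) : List Int :=
  match vs, s with
  | [], _ => []
  | v :: t, 0 => v :: pvEvery t (n - 1) n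
  | _ :: t, s + 1 => pvEvery t s n

-- ---- small Nat-mod facts (variable modulus, so not omega-able directly) ----
theorem pv_mod_succ (j n : Nat) (hn : 0 < n) :
    (j + 1) % n = if j % n + 1 = n then 0 else j % n + 1 := by
  have hr := Nat.mod_lt j hn
  rcases Nat.lt_or_ge 1 n with h2 | h2
  · rw [Nat.add_mod, Nat.mod_eq_of_lt h2]
    by_cases h : j % n + 1 = n
    · rw [if_pos h, h, Nat.mod_self]
    · rw [if_neg h, Nat.mod_eq_of_lt (by omega)]
  · have hn1 : n = 1 := by omega
    subst hn1; simp [Nat.mod_one]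

theorem pv_mod_sub (k r n : Nat) (hk : k < n) (hr : r < n) :
    (k + n - r) % n = if r ≤ k then k - r else k + n - r := by
  by_cases h : r ≤ k
  · rw [if_pos h, show k + n - r = (k - r) + n by omega, Nat.add_mod_right,
      Nat.mod_eq_of_lt (by omega)]
  · rw [if_neg h, Nat.mod_eq_of_lt (by omega)]

-- ---- pyRange with a positive step: nil / cons / shift ----
theorem pv_pyRange_pos_nil (a b s : Int) (hs : 0 < s) (hba : b ≤ a) :
    PySem.List.pyRange a b s = [] := by
  rw [PySem.List.pyRange_of_pos a b hs, if_neg (by omega)]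
  simp

theorem pv_pyRange_pos_cons (a b s : Int) (hs : 0 < s) (hab : a < b) :
    PySem.List.pyRange a b s = a :: PySem.List.pyRange (a + s) b s := by
  have hs0 : s ≠ 0 := by omega
  have hdiv : (b - a + s - 1) / s = (b - a - 1) / s + 1 := by
    rw [show b - a + s - 1 = (b - a - 1) + 1 * s by ring, Int.add_mul_ediv_right _ _ hs0]
  have hq0 : 0 ≤ (b - a - 1) / s := Int.ediv_nonneg (by omega) (by omega)
  rw [PySem.List.pyRange_of_pos a b hs, if_pos hab, hdiv,
    show ((b - a - 1) / s + 1).toNat = ((b - a - 1) / s).toNat + 1 by omega,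
    List.range_succ_eq_map]
  simp only [List.map_cons, List.map_map, Nat.cast_zero, mul_zero, add_zero]
  congr 1
  by_cases h2 : a + s < b
  · rw [PySem.List.pyRange_of_pos _ b hs, if_pos h2,
      show b - (a + s) + s - 1 = b - a - 1 by ring]
    apply List.map_congr_left
    intro k _
    simp only [Function.comp_apply]
    push_cast
    ring
  · rw [pv_pyRange_pos_nil _ _ _ hs (by omega),
      show (b - a - 1) / s = 0 from Int.ediv_eq_zero_of_lt (by omega) (by omega)]
    simp

theorem pv_pyRange_pos_shift (a b s : Int) (hs : 0 < s) :
    PySem.List.pyRange (a + 1) (b + 1) s = (PySem.List.pyRange a b s).map (· + 1) := by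
  rw [PySem.List.pyRange_of_pos _ _ hs, PySem.List.pyRange_of_pos a b hs,
    show b + 1 - (a + 1) + s - 1 = b - a + s - 1 by ring, List.map_map]
  simp only [show (a + 1 < b + 1) ↔ (a < b) from by omega]
  apply List.map_congr_left
  intro k _
  simp only [Function.comp_apply]
  ring

-- pyGetD on a cons at a shifted nonnegative index
theorem pv_pyGetD_cons_succ (v : Int) (t : List Int) (j : Int) (hj : 0 ≤ j) :
    PySem.List.pyGetD (v :: t) (j + 1) 0 = PySem.List.pyGetD t j 0 := by
  obtain ⟨m, rfl⟩ := Int.eq_ofNat_of_zero_le hj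
  rw [show ((m : Int) + 1) = (((m + 1 : Nat)) : Int) by push_cast; ring,
    PySem.List.pyGetD_natCast, PySem.List.pyGetD_natCast, List.getD_cons_succ]

-- A's strided sublist equals pvEvery
theorem pv_stride_eq_every (vs : List Int) (s n : Nat) (hn : 0 < n) :
    (PySem.List.pyRange (s : Int) (vs.length : Int) (n : Int)).map
      (fun j => PySem.List.pyGetD vs j 0) = pvEvery vs s n := by
  obtain ⟨m, rfl⟩ : ∃ m, n = m + 1 := ⟨n - 1, by omega⟩
  induction vs generalizing s with
  | nil =>
    rw [show ((List.length ([] : List Int)) : Int) = 0 by simp,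
      pv_pyRange_pos_nil _ _ _ (by exact_mod_cast hn) (by exact_mod_cast Nat.zero_le s)]
    simp [pvEvery]
  | cons v t ih =>
    have hlen : (((v :: t).length) : Int) = (t.length : Int) + 1 := by
      simp [List.length_cons]
    have hstep : ((m + 1 : Nat) : Int) = (m : Int) + 1 := by push_cast; ring
    cases s with
    | zero =>
      rw [Nat.cast_zero,
        pv_pyRange_pos_cons 0 _ _ (by exact_mod_cast hn) (by rw [hlen]; omega),
        zero_add, List.map_cons, hlen, hstep,
        pv_pyRange_pos_shift _ _ _ (by omega), List.map_map,
        show pvEvery (v :: t) 0 (m + 1) = v :: pvEvery t m (m + 1) from rfl]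
      congr 1
      · simp [PySem.List.pyGetD_zero_cons]
      · rw [← ih m]
        apply List.map_congr_left
        intro j hj
        have hm := (PySem.List.mem_pyRange_iff_of_pos
          (a := (m : Int)) (b := (t.length : Int)) (s := (m : Int) + 1)
          (by omega) j).mp hj
        simp only [Function.comp_apply]
        exact pv_pyGetD_cons_succ v t j (by omega)
    | succ s' =>
      rw [show ((s' + 1 : Nat) : Int) = (s' : Int) + 1 by push_cast; ring, hlen, hstep,
        pv_pyRange_pos_shift _ _ _ (by omega), List.map_map,
        show pvEvery (v :: t) (s' + 1) (m + 1) = pvEvery t s' (m + 1) from rfl, ← ih s']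
      apply List.map_congr_left
      intro j hj
      have hm := (PySem.List.mem_pyRange_iff_of_pos
        (a := (s' : Int)) (b := (t.length : Int)) (s := (m : Int) + 1)
        (by omega) j).mp hj
      simp only [Function.comp_apply]
      exact pv_pyGetD_cons_succ v t j (by omega)

-- the fold preserves the accumulator-list length
theorem pv_fold_length (mc : Int) (l : List (Int × Int)) (accs : List (Option (Int × Int))) :
    (l.foldl (pvStepB mc) accs).length = accs.length := by
  induction l generalizing accs with
  | nil => rfl
  | cons x t ih =>
    rw [List.foldl_cons, ih]
    simp [pvStepB, PySem.List.length_pySetD]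

-- the loop invariant: bucket k of the fold collects pvEvery at the right phase
theorem pv_fold_invariant (vs : List Int) (n : Nat) (hn : 0 < n) :
    ∀ (accs : List (Option (Int × Int))) (j0 : Nat), accs.length = n →
    ∀ k, k < n →
    ((PySem.List.enumerate vs (j0 : Int)).foldl (pvStepB (n : Int)) accs).getD k none
      = (pvEvery vs ((k + n - j0 % n) % n) n).foldl pvUpd (accs.getD k none) := by
  induction vs with
  | nil =>
    intro accs j0 _ k _
    simp [PySem.List.enumerate_nil, pvEvery]
  | cons v t ih =>
    intro accs j0 hlen k hk
    rw [PySem.List.enumerate_cons, List.foldl_cons]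
    have hstep : pvStepB (n : Int) accs ((j0 : Int), v)
        = accs.set (j0 % n) (pvUpd (accs.getD (j0 % n) none) v) := by
      simp only [pvStepB, PySem.Int.mod_natCast, PySem.List.pySetD_natCast,
        PySem.List.pyGetD_natCast]
    have hcast : ((j0 : Int) + 1) = (((j0 + 1 : Nat)) : Int) := by push_cast; ring
    rw [hstep, hcast,
      ih (accs.set (j0 % n) (pvUpd (accs.getD (j0 % n) none) v)) (j0 + 1)
        (by simp [hlen]) k hk]
    have hr : j0 % n < n := Nat.mod_lt j0 hn
    by_cases hhit : j0 % n = k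
    · -- this element lands in bucket k
      have hd0 : (k + n - j0 % n) % n = 0 := by
        rw [hhit, show k + n - k = n by omega, Nat.mod_self]
      have hd1 : (k + n - (j0 + 1) % n) % n = n - 1 := by
        rw [pv_mod_succ j0 n hn, hhit]
        by_cases h : k + 1 = n
        · rw [if_pos h, show k + n - 0 = k + n by omega, Nat.add_mod_right,
            Nat.mod_eq_of_lt hk]; omega
        · rw [if_neg h, pv_mod_sub k (k + 1) n hk (by omega), if_neg (by omega)]
          omega
      have hget : (accs.set (j0 % n) (pvUpd (accs.getD (j0 % n) none) v)).getD k none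
          = pvUpd (accs.getD (j0 % n) none) v := by
        rw [hhit, List.getD_eq_getElem?_getD, List.getElem?_set_self (by omega)]
        rfl
      rw [hget, hd1, hd0, show pvEvery (v :: t) 0 n = v :: pvEvery t (n - 1) n from rfl,
        List.foldl_cons, hhit]
    · -- bucket k untouched
      have hd : (k + n - j0 % n) % n = (k + n - (j0 + 1) % n) % n + 1 := by
        rw [pv_mod_succ j0 n hn, pv_mod_sub k (j0 % n) n hk hr]
        by_cases h : j0 % n + 1 = n
        · rw [if_pos h, show k + n - 0 = k + n by omega, Nat.add_mod_right,
            Nat.mod_eq_of_lt hk, if_neg (by omega)]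
          omega
        · rw [if_neg h, pv_mod_sub k (j0 % n + 1) n hk (by omega)]
          by_cases h2 : j0 % n ≤ k
          · rw [if_pos h2, if_pos (by omega)]
            omega
          · rw [if_neg h2, if_neg (by omega)]
            omega
      have hget : (accs.set (j0 % n) (pvUpd (accs.getD (j0 % n) none) v)).getD k none
          = accs.getD k none := by
        rw [List.getD_eq_getElem?_getD, List.getElem?_set_ne (by omega),
          List.getD_eq_getElem?_getD]
      rw [hget, hd,
        show pvEvery (v :: t) ((k + n - (j0 + 1) % n) % n + 1) n
          = pvEvery t ((k + n - (j0 + 1) % n) % n) n from rfl]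

-- the final accumulator list, as a map over bucket indices
theorem pv_fold_final (vs : List Int) (n : Nat) (hn : 0 < n) :
    (PySem.List.enumerate vs 0).foldl (pvStepB (n : Int)) (List.replicate n none)
      = (List.range n).map (fun k => (pvEvery vs k n).foldl pvUpd none) := by
  apply List.ext_getElem
  · rw [pv_fold_length]
    simp
  · intro k h1 h2
    have hk : k < n := by
      rw [pv_fold_length] at h1
      simpa using h1
    have hlen1 : k < ((PySem.List.enumerate vs 0).foldl (pvStepB (n : Int))
        (List.replicate n none)).length := h1
    have hval := pv_fold_invariant vs n hn (List.replicate n none) 0 (by simp) k hk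
    rw [show (((0 : Nat)) : Int) = (0 : Int) from rfl] at hval
    have hgd : ((PySem.List.enumerate vs 0).foldl (pvStepB (n : Int))
          (List.replicate n none))[k]
        = ((PySem.List.enumerate vs 0).foldl (pvStepB (n : Int))
          (List.replicate n none)).getD k none := by
      rw [List.getD_eq_getElem?_getD, List.getElem?_eq_getElem hlen1]
      rfl
    have hrep : (List.replicate n (none : Option (Int × Int))).getD k none = none := by
      simp [List.getD_eq_getElem?_getD, hk]
    have hd : (k + n - 0 % n) % n = k := by
      rw [Nat.zero_mod, Nat.sub_zero, Nat.add_mod_right, Nat.mod_eq_of_lt hk]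
    rw [hgd, hval, hrep, hd]
    simp

-- the two per-bucket formatters agree
theorem pv_upd_some (t : List Int) : ∀ (mn mx : Int),
    t.foldl pvUpd (some (mn, mx)) = some (t.foldl min mn, t.foldl max mx) := by
  induction t with
  | nil => intro mn mx; rfl
  | cons v t ih =>
    intro mn mx
    rw [List.foldl_cons, show pvUpd (some (mn, mx)) v = some (min mn v, max mx v) from rfl,
      ih, List.foldl_cons, List.foldl_cons]

theorem pv_fmmr_eq_fmtAcc (l : List Int) :
    pvFmmr l = pvFmtAcc (l.foldl pvUpd none) := by
  match l with
  | [] => rfl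
  | [x] =>
    simp [pvFmmr, pvFmtAcc, pvUpd, PySem.List.pyGetD_zero_cons]
  | x :: y :: t =>
    rw [List.foldl_cons, show pvUpd none x = some (x, x) from rfl, pv_upd_some]
    simp only [pvFmmr, pvFmtAcc, PySem.List.min?_id_cons, PySem.List.max?_id_cons]
    simp

-- every element with bucket width 1
theorem pv_every_one (vs : List Int) : pvEvery vs 0 1 = vs := by
  induction vs with
  | nil => rfl
  | cons v t ih => rw [show pvEvery (v :: t) 0 1 = v :: pvEvery t 0 1 from rfl, ih]

-- singleton / empty join
theorem pv_join_singleton (p : String) : PySem.Str.join "_" [p] = p := by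
  simp [PySem.Str.join]

-- the B side for a positive count, in A's shape
theorem pv_main (values : List Int) (n : Nat) (hn : 0 < n) :
    (PySem.List.pyRange 0 (n : Int) 1).map (fun i =>
        pvFmmr ((PySem.List.pyRange i (values.length : Int) (n : Int)).map
          (fun j => PySem.List.pyGetD values j 0)))
      = ((PySem.List.enumerate values 0).foldl (pvStepB (n : Int))
          (List.replicate n none)).map pvFmtAcc := by
  rw [pv_fold_final values n hn, List.map_map, PySem.List.pyRange_zero_nat, List.map_map]
  apply List.map_congr_left
  intro k hk
  have hkn : k < n := List.mem_range.mp hk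
  simp only [Function.comp_apply]
  rw [pv_stride_eq_every values k n hn, pv_fmmr_eq_fmtAcc]

-- ===== VERDICT (by name: the statement is the Claim_ definition above) =====
theorem format_multi_motif_range_spec : Claim_equal_format_multi_motif_range := by
  intro values motif_count _
  unfold Spec_format_multi_motif_range format_multi_motif_range format_multi_motif_range_alt
  by_cases hv : values = []
  · simp [hv]
  · rw [if_neg hv, if_neg hv]
    by_cases hpos : motif_count ≤ 0
    · rw [if_pos hpos, if_neg (by omega), PySem.List.pyRange_one_eq_nil hpos]
      rfl
    · rw [if_neg hpos]
      obtain ⟨n, rfl⟩ : ∃ n : Nat, motif_count = (n : Int) :=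
        ⟨motif_count.toNat, by omega⟩
      have hn : 0 < n := by omega
      have htn : ((n : Int)).toNat = n := by omega
      rw [htn]
      by_cases h1 : (n : Int) = 1
      · have hn1 : n = 1 := by omega
        subst hn1
        rw [if_pos h1, ← pv_main values 1 (by omega),
          show PySem.List.pyRange 0 ((1 : Nat) : Int) 1 = [(0 : Int)] from by decide]
        simp only [List.map_cons, List.map_nil]
        rw [pv_join_singleton]
        exact congrArg pvFmmr
          ((pv_stride_eq_every values 0 1 (by omega)).trans (pv_every_one values)).symm
      · rw [if_neg h1, pv_main values n hn]
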